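-- pv_equiv track=rewrite | github.com/krishnakamalbaishnab/Data-Structures-and-Algorithms | 7 Strings/Python/compare_palindrome.py | compare_strings_ascii
-- ===== SOURCE A (Python) =====
-- def compare_strings_ascii(s1, s2):
--     min_length = min(len(s1), len(s2))
--
--     for i in range(min_length):
--         if ord(s1[i]) > ord(s2[i]):
--             return f'"{s1}" is greater than "{s2}"'
--         elif ord(s1[i]) < ord(s2[i]):
--             return f'"{s1}" is smaller than "{s2}"'
--
--     if len(s1) > len(s2):
--         return f'"{s1}" is greater than "{s2}"'
--     elif len(s1) < len(s2):
--         return f'"{s1}" is smaller than "{s2}"'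
--     else:
--         return "Strings are equal"
-- ===== SOURCE B (Python) =====
-- def compare_strings_ascii(s1, s2):
--     if s1 > s2:
--         return f'"{s1}" is greater than "{s2}"'
--     elif s1 < s2:
--         return f'"{s1}" is smaller than "{s2}"'
--     else:
--         return "Strings are equal"
-- ===== Notes on version B (the rewrite author's own statement) =====
-- stated objective: idiomatic
-- what changed: Replaces the explicit index loop with ord() plus the separate length tie-break by a single delegated built-in string comparison (C-level, same code-point order and prefix rule).
import Mathlib
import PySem

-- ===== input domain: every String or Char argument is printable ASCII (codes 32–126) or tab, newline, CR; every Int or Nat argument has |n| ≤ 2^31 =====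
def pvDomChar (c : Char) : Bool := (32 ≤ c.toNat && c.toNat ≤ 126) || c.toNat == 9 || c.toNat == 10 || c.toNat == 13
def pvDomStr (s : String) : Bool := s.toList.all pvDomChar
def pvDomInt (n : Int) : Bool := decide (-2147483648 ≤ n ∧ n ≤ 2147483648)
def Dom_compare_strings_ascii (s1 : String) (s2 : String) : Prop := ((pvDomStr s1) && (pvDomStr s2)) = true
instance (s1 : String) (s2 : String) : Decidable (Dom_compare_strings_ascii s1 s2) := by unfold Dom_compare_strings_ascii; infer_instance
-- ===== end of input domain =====

-- B replaces A's explicit character loop and length tie-break by a single built-in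
-- lexicographic string comparison (idiomatic; same result, same cost).

-- ===== PORT A =====
-- A's for-loop over range(min(len(s1),len(s2))), indexing both strings at i:
-- ported as simultaneous recursion on the two character lists (the same traversal,
-- with the same early returns); `none` means the loop finished without returning.
def pvLoopA : List Char → List Char → Option Bool
  | a :: as, b :: bs =>
    if a.toNat > b.toNat then some true
    else if a.toNat < b.toNat then some false
    else pvLoopA as bs
  | _, _ => none

def compare_strings_ascii (s1 : String) (s2 : String) : String :=
  match pvLoopA s1.toList s2.toList with
  | some true => "\"" ++ s1 ++ "\" is greater than \"" ++ s2 ++ "\""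
  | some false => "\"" ++ s1 ++ "\" is smaller than \"" ++ s2 ++ "\""
  | none =>
    if s1.toList.length > s2.toList.length then "\"" ++ s1 ++ "\" is greater than \"" ++ s2 ++ "\""
    else if s1.toList.length < s2.toList.length then "\"" ++ s1 ++ "\" is smaller than \"" ++ s2 ++ "\""
    else "Strings are equal"

-- ===== PORT B =====
-- Python's `s1 > s2` / `s1 < s2` on strings is code-point lexicographic order with
-- the prefix rule; Lean's String `<` (List.Lex `<` on the characters) is exactly that.
def compare_strings_ascii_alt (s1 : String) (s2 : String) : String :=
  if s2 < s1 then "\"" ++ s1 ++ "\" is greater than \"" ++ s2 ++ "\""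
  else if s1 < s2 then "\"" ++ s1 ++ "\" is smaller than \"" ++ s2 ++ "\""
  else "Strings are equal"

-- ===== PRECONDITION & SPEC =====
def Spec_compare_strings_ascii (s1 : String) (s2 : String) (out : String) : Prop := out = compare_strings_ascii_alt s1 s2
instance (s1 : String) (s2 : String) (out : String) : Decidable (Spec_compare_strings_ascii s1 s2 out) := by unfold Spec_compare_strings_ascii; infer_instance

-- ===== CLAIM (what is proved, stated in full; the proofs are below) =====
def Claim_equal_compare_strings_ascii : Prop := ∀ (s1 : String) (s2 : String), Dom_compare_strings_ascii s1 s2 → Spec_compare_strings_ascii s1 s2 (compare_strings_ascii s1 s2)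

-- ===== LEMMAS AND PROOFS =====

-- The loop-plus-length verdict of A equals the lexicographic-order verdict of B,
-- for any choice of the three result strings.
theorem pvVerdict (l1 l2 : List Char) (g s e : String) :
    (match pvLoopA l1 l2 with
     | some true => g
     | some false => s
     | none =>
       if l1.length > l2.length then g
       else if l1.length < l2.length then s
       else e)
    = (if l2 < l1 then g else if l1 < l2 then s else e) := by
  induction l1 generalizing l2 with
  | nil =>
    cases l2 with
    | nil => simp [pvLoopA]
    | cons b bs => simp [pvLoopA, List.nil_lt_cons]
  | cons a as ih =>
    cases l2 with
    | nil => simp [pvLoopA, List.nil_lt_cons]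
    | cons b bs =>
      have hlt : ∀ x y : Char, x < y ↔ x.toNat < y.toNat := fun x y => gt_iff_lt
      rcases lt_trichotomy a b with h | h | h
      · have hn : a.toNat < b.toNat := (hlt a b).mp h
        have hba : ¬ b < a := by rw [hlt]; omega
        have hne : ¬ b = a := fun hba' => by subst hba'; omega
        simp [pvLoopA, hn, Nat.not_lt.mpr (Nat.le_of_lt hn), List.cons_lt_cons_iff,
          hba, hne, h]
      · subst h
        simpa [pvLoopA, List.cons_lt_cons_iff, Nat.succ_lt_succ_iff] using ih bs
      · have hn : b.toNat < a.toNat := (hlt b a).mp h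
        have hab : ¬ a < b := by rw [hlt]; omega
        have hne : ¬ a = b := fun h' => by subst h'; omega
        simp [pvLoopA, hn, List.cons_lt_cons_iff, h]

-- ===== VERDICT (by name: the statement is the Claim_ definition above) =====
theorem compare_strings_ascii_spec : Claim_equal_compare_strings_ascii := by
  intro s1 s2 _
  unfold Spec_compare_strings_ascii compare_strings_ascii compare_strings_ascii_alt
  rw [pvVerdict]
  split_ifs with h1 h2 h3 h4 h5 <;> simp_all [String.lt_iff] <;>
    first
    | exact absurd (‹s1.toList < s2.toList›.trans ‹s2.toList < s1.toList›) (lt_irrefl _)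
    | exact absurd ‹s2.toList < s1.toList› (not_lt.mpr ‹s1.toList ≤ s2.toList›)
    | exact absurd ‹s1.toList < s2.toList› (not_lt.mpr ‹s2.toList ≤ s1.toList›)
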